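-- pv_equiv track=rewrite | github.com/YoruAlptraum/leetcode | python/1630. Arithmetic Subarrays.py | checkArithmetic
-- ===== SOURCE A (Python) =====
-- from typing import List
--
-- def checkArithmetic(sub: List[int]) -> bool:
--     if len(sub) <= 1:
--         return False
--     dif = sub[1] - sub[0]
--     for i in range(1,len(sub)):
--         if sub[i] - sub[i-1] != dif:
--             return False
--     return True
-- ===== SOURCE B (Python) =====
-- def checkArithmetic(sub):
--     if len(sub) <= 1:
--         return False
--     d = sub[1] - sub[0]
--     return sub == [sub[0] + i * d for i in range(len(sub))]
-- ===== Notes on version B (the rewrite author's own statement) =====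
-- stated objective: alternative
-- what changed: B never scans consecutive differences: it reconstructs the whole expected arithmetic progression from the closed form (first element plus i times the common difference) and returns whether the input list equals that generated list.
import Mathlib
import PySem

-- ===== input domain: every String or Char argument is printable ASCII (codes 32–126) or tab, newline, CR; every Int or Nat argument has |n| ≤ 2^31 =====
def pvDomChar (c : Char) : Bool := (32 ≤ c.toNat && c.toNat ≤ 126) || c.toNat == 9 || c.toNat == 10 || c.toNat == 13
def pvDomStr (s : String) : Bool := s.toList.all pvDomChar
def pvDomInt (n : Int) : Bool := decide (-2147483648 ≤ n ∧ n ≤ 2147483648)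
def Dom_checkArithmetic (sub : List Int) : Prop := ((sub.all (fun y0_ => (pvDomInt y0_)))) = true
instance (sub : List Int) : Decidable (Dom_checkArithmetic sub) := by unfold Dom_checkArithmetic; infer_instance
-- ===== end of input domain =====

-- B never scans consecutive differences: it reconstructs the expected arithmetic
-- progression from the closed form sub[0] + i*d and compares the input with it.

-- ===== PORT A =====
-- loop 'for i in range(1,len(sub))' with early return: prev = sub[i-1], rest = sub[i:]
def pvGoA (dif prev : Int) (rest : List Int) : Bool :=
  match rest with
  | [] => true
  | x :: xs => if x - prev ≠ dif then false else pvGoA dif x xs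

def checkArithmetic (sub : List Int) : Bool :=
  match sub with
  | a :: b :: rest => pvGoA (b - a) a (b :: rest)
  | _ => false   -- guard: too short, return False

-- ===== PORT B =====
-- 'sub == [sub[0] + i * d for i in range(len(sub))]': build the expected progression, compare
def checkArithmetic_alt (sub : List Int) : Bool :=
  match sub with
  | [] => false        -- guard: too short, return False
  | [_] => false       -- guard: too short, return False
  | a :: b :: rest =>
    let d := b - a
    decide (a :: b :: rest =
      (PySem.List.pyRange 0 ((a :: b :: rest).length : Int) 1).map (fun i => a + i * d))

-- ===== PRECONDITION & SPEC =====
def Spec_checkArithmetic (sub : List Int) (out : Bool) : Prop := out = checkArithmetic_alt sub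
instance (sub : List Int) (out : Bool) : Decidable (Spec_checkArithmetic sub out) := by unfold Spec_checkArithmetic; infer_instance

-- ===== CLAIM (what is proved, stated in full; the proofs are below) =====
def Claim_equal_checkArithmetic : Prop := ∀ (sub : List Int), Dom_checkArithmetic sub → Spec_checkArithmetic sub (checkArithmetic sub)

-- ===== LEMMAS AND PROOFS =====
-- characterisation of A's early-return scan: it accepts exactly the tail of the
-- progression continuing from prev with difference d
theorem goA_char (rest : List Int) : ∀ (p d : Int),
    pvGoA d p rest
      = decide (rest = (List.range rest.length).map (fun k : Nat => p + ((k : Int) + 1) * d)) := by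
  induction rest with
  | nil => intro p d; simp [pvGoA]
  | cons x xs ih =>
    intro p d
    simp only [pvGoA]
    by_cases h : x - p = d
    · rw [if_neg (by omega : ¬ (x - p ≠ d)), ih x d]
      have hmap : (List.range xs.length).map (fun k : Nat => x + ((k : Int) + 1) * d)
          = ((List.range xs.length).map Nat.succ).map (fun k : Nat => p + ((k : Int) + 1) * d) := by
        rw [List.map_map]
        refine List.map_congr_left (fun k _ => ?_)
        simp only [Function.comp_apply]
        push_cast
        have hx : x = p + d := by omega
        rw [hx]; ring
      rw [hmap]
      simp only [List.length_cons, List.range_succ_eq_map, List.map_cons]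
      rw [decide_eq_decide]
      constructor
      · intro hxs
        exact List.cons_eq_cons.mpr ⟨by push_cast; omega, hxs⟩
      · intro hc; exact (List.cons_eq_cons.mp hc).2
    · rw [if_pos h]
      simp only [List.length_cons, List.range_succ_eq_map, List.map_cons]
      symm
      rw [decide_eq_false_iff_not]
      intro hc
      have := (List.cons_eq_cons.mp hc).1
      push_cast at this
      omega

-- B's generated list, with the head peeled off, is A's scan condition
theorem altB_char (a b : Int) (rest : List Int) :
    checkArithmetic_alt (a :: b :: rest)
      = decide (b :: rest
          = (List.range (b :: rest).length).map (fun k : Nat => a + ((k : Int) + 1) * (b - a))) := by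
  simp only [checkArithmetic_alt]
  rw [show (((a :: b :: rest).length : Nat) : Int) = ((rest.length + 1 + 1 : Nat) : Int) by simp]
  rw [PySem.List.pyRange_zero_natCast, List.map_map]
  rw [List.range_succ_eq_map]
  simp only [List.map_cons, List.map_map]
  have hx0 : ((fun i => a + i * (b - a)) ∘ fun k : Nat => (k : Int)) 0 = a := by
    simp
  rw [hx0]
  have hmap : (List.range (rest.length + 1)).map
        (((fun i => a + i * (b - a)) ∘ fun k : Nat => (k : Int)) ∘ Nat.succ)
      = (List.range (rest.length + 1)).map (fun k : Nat => a + ((k : Int) + 1) * (b - a)) := by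
    refine List.map_congr_left (fun k _ => ?_)
    simp only [Function.comp_apply]
    push_cast; ring
  rw [hmap, decide_eq_decide]
  simp only [List.length_cons, List.cons_eq_cons, true_and]

-- ===== VERDICT (by name: the statement is the Claim_ definition above) =====
theorem checkArithmetic_spec : Claim_equal_checkArithmetic := by
  intro sub _
  unfold Spec_checkArithmetic
  match sub with
  | [] => rfl
  | [a] => rfl
  | a :: b :: rest =>
    show pvGoA (b - a) a (b :: rest) = _
    rw [goA_char (b :: rest) a (b - a), altB_char a b rest]
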